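-- pv_equiv track=rewrite | github.com/jliu158/Python-Code | LogicAgent/CommonCheck.py | PL_True_P4_1
-- ===== SOURCE A (Python) =====
-- def Implied(P1, P2):
--     if (P1, P2) == (True, False):
--         return False
--     else:
--         return True
--
-- def PL_True_P4_1(sentence, model, alpha):
--     PL_check = True
--     A = model['A']
--     B = model['B']
--     C = model['C']
--     for Ri in sentence:
--         if Ri == alpha[0]:
--             return model[Ri]
--         elif Ri == 'R1':
--             PL_check = PL_check & Implied(A, C & A)
--         elif Ri == 'R2':
--             PL_check = PL_check & Implied(B, not C)
--         elif Ri == 'R3':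
--             PL_check = PL_check & Implied(C, B or not A)
--         elif Ri == 'R4':
--             P = not (C & A)
--             PL_check = PL_check & Implied(not A, P)
--         elif Ri == 'R5':
--             PL_check = PL_check & Implied(not B, C)
--         elif Ri == 'R6':
--             P = (not B) & A
--             PL_check = PL_check & Implied(not C, P)
--     return PL_check
-- ===== SOURCE B (Python) =====
-- # Truth-table re-implementation: each rule is an implication over (A, B, C), so it fails
-- # on a fixed set of the 8 models.  Encode the model as a 3-bit index m = 4A+2B+C and each
-- # rule as an 8-bit mask of the models where it fails; the sentence holds iff bit m of the
-- # OR of its rules' masks is clear.  The early return model[alpha[0]] is kept up front.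
-- _FAIL = {
--     'R1': 0b01010000,  # A and not C          (Implied(A, C&A) fails)
--     'R2': 0b10001000,  # B and C              (Implied(B, not C) fails)
--     'R3': 0b00100000,  # C and A and not B    (Implied(C, B or not A) fails)
--     'R4': 0b00000000,  # never fails          (Implied(not A, not(C&A)))
--     'R5': 0b00010001,  # not B and not C      (Implied(not B, C) fails)
--     'R6': 0b01000101,  # not C and (B or not A)  (Implied(not C, (not B)&A) fails)
-- }
--
-- def PL_True_P4_1(sentence, model, alpha):
--     m = 4 * model['A'] + 2 * model['B'] + model['C']
--     if sentence and alpha[0] in sentence: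
--         return model[alpha[0]]
--     mask = 0
--     for Ri in sentence:
--         mask |= _FAIL.get(Ri, 0)
--     return not ((mask >> m) & 1)
-- ===== Notes on version B (the rewrite author's own statement) =====
-- stated objective: alternative
-- what changed: B evaluates the knowledge base by truth table: the model (A,B,C) is encoded as a 3-bit index and each rule as a precomputed 8-bit mask of the models where its implication fails; the result is one bit test on the OR of the sentence's masks, replacing A's per-rule boolean evaluation with Implied; the early return model[alpha[0]] is kept as a separate up-front membership test.
import Mathlib
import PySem

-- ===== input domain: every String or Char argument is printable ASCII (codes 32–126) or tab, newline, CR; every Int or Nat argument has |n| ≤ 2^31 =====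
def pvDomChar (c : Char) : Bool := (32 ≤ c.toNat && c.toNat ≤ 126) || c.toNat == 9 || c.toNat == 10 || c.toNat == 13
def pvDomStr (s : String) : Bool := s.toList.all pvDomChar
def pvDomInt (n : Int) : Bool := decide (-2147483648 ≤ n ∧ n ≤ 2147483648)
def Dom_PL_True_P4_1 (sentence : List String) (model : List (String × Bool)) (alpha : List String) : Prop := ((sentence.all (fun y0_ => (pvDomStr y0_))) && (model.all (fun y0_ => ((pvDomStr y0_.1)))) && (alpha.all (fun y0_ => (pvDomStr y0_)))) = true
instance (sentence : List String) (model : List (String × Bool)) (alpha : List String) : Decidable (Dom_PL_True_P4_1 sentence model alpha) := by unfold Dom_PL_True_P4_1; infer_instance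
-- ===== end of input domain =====

-- B replaces the per-rule boolean evaluation by a truth table: the model becomes a 3-bit
-- index and each rule an 8-bit failure mask; the answer is a single bit test on the OR of masks.
-- ===== PORT A =====
-- Port of Implied: if (P1, P2) == (True, False): return False else True
def Implied (P1 P2 : Bool) : Bool :=
  if P1 = true ∧ P2 = false then false else true

-- the loop of A: early return model[Ri] on Ri == alpha[0], else accumulate rule implications
def pvLoopA (model : List (String × Bool)) (a0 : String) (A B C : Bool) :
    List String → Bool → Bool
  | [], acc => acc
  | Ri :: rest, acc =>
    if Ri = a0 then ((model.lookup Ri).getD false)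
    else if Ri = "R1" then pvLoopA model a0 A B C rest (acc && Implied A (C && A))
    else if Ri = "R2" then pvLoopA model a0 A B C rest (acc && Implied B (!C))
    else if Ri = "R3" then pvLoopA model a0 A B C rest (acc && Implied C (B || !A))
    else if Ri = "R4" then pvLoopA model a0 A B C rest (acc && Implied (!A) (!(C && A)))
    else if Ri = "R5" then pvLoopA model a0 A B C rest (acc && Implied (!B) C)
    else if Ri = "R6" then pvLoopA model a0 A B C rest (acc && Implied (!C) ((!B) && A))
    else pvLoopA model a0 A B C rest acc

-- model['X'] ports as first-match lookup; KeyError/IndexError cases are excluded by Pre_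
def PL_True_P4_1 (sentence : List String) (model : List (String × Bool)) (alpha : List String) : Bool :=
  let A := (model.lookup "A").getD false
  let B := (model.lookup "B").getD false
  let C := (model.lookup "C").getD false
  pvLoopA model (alpha.headD "") A B C sentence true

-- ===== PORT B =====
-- the per-rule 8-bit failure mask (_FAIL.get(Ri, 0))
def pvFailMask (Ri : String) : Nat :=
  if Ri = "R1" then 0b01010000
  else if Ri = "R2" then 0b10001000
  else if Ri = "R3" then 0b00100000
  else if Ri = "R4" then 0b00000000
  else if Ri = "R5" then 0b00010001
  else if Ri = "R6" then 0b01000101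
  else 0

def PL_True_P4_1_alt (sentence : List String) (model : List (String × Bool)) (alpha : List String) : Bool :=
  let m := 4 * (cond ((model.lookup "A").getD false) 1 0)
         + 2 * (cond ((model.lookup "B").getD false) 1 0)
         + (cond ((model.lookup "C").getD false) 1 0)
  if !sentence.isEmpty && sentence.contains (alpha.headD "") then
    (model.lookup (alpha.headD "")).getD false
  else
    let mask := sentence.foldl (fun acc Ri => acc ||| pvFailMask Ri) 0
    !(((mask >>> m) &&& 1) == 1)

-- ===== PRECONDITION & SPEC =====
-- Pre_ excludes exactly the inputs where A raises: missing model keys 'A'/'B'/'C' (KeyError),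
-- empty alpha with nonempty sentence (IndexError), or alpha[0] in sentence but not in model (KeyError).
def Pre_PL_True_P4_1 (sentence : List String) (model : List (String × Bool)) (alpha : List String) : Prop :=
  (model.lookup "A").isSome ∧ (model.lookup "B").isSome ∧ (model.lookup "C").isSome ∧
  (sentence ≠ [] → alpha ≠ [] ∧ (alpha.headD "" ∈ sentence → (model.lookup (alpha.headD "")).isSome))

instance (sentence : List String) (model : List (String × Bool)) (alpha : List String) : Decidable (Pre_PL_True_P4_1 sentence model alpha) := by unfold Pre_PL_True_P4_1; infer_instance

def pvWitness_PL_True_P4_1 : List String × (List (String × Bool)) × List String :=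
  (["R1", "R2"], [("A", true), ("B", false), ("C", true)], ["A"])

def Spec_PL_True_P4_1 (sentence : List String) (model : List (String × Bool)) (alpha : List String) (out : Bool) : Prop := out = PL_True_P4_1_alt sentence model alpha
instance (sentence : List String) (model : List (String × Bool)) (alpha : List String) (out : Bool) : Decidable (Spec_PL_True_P4_1 sentence model alpha out) := by unfold Spec_PL_True_P4_1; infer_instance

-- ===== CLAIM (what is proved, stated in full; the proofs are below) =====
def Claim_equal_PL_True_P4_1 : Prop := ∀ (sentence : List String) (model : List (String × Bool)) (alpha : List String), Dom_PL_True_P4_1 sentence model alpha → Pre_PL_True_P4_1 sentence model alpha → Spec_PL_True_P4_1 sentence model alpha (PL_True_P4_1 sentence model alpha)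

-- ===== LEMMAS AND PROOFS =====

-- the truth value of rule Ri under (A,B,C), as A's loop computes it
def pvRule (A B C : Bool) (Ri : String) : Bool :=
  if Ri = "R1" then Implied A (C && A)
  else if Ri = "R2" then Implied B (!C)
  else if Ri = "R3" then Implied C (B || !A)
  else if Ri = "R4" then Implied (!A) (!(C && A))
  else if Ri = "R5" then Implied (!B) C
  else if Ri = "R6" then Implied (!C) ((!B) && A)
  else true

-- bit 4A+2B+C of rule Ri's mask is set exactly when the rule fails under (A,B,C)
theorem pvFailMask_testBit (A B C : Bool) (Ri : String) :
    (pvFailMask Ri).testBit (4 * (cond A 1 0) + 2 * (cond B 1 0) + (cond C 1 0)) = !(pvRule A B C Ri) := by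
  simp only [pvFailMask, pvRule]
  split_ifs <;> cases A <;> cases B <;> cases C <;> decide

-- the OR-fold's bit m is the OR of the individual masks' bits m
theorem pvFoldMask_testBit (m : Nat) :
    ∀ (s : List String) (mask0 : Nat),
      (s.foldl (fun acc Ri => acc ||| pvFailMask Ri) mask0).testBit m =
        (mask0.testBit m || s.any (fun Ri => (pvFailMask Ri).testBit m)) := by
  intro s
  induction s with
  | nil => intro mask0; simp
  | cons x xs ih =>
    intro mask0
    simp only [List.foldl_cons, ih, Nat.testBit_or, List.any_cons]
    ac_rfl

theorem testBit_as_shift (n m : Nat) : (((n >>> m) &&& 1) == 1) = n.testBit m := by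
  simp [Nat.testBit, Nat.and_comm]

-- Loop invariant for A: early lookup if a0 still occurs, else acc AND the remaining rules
theorem pvLoopA_eq (model : List (String × Bool)) (a0 : String) (A B C : Bool) :
    ∀ (s : List String) (acc : Bool),
      pvLoopA model a0 A B C s acc =
        if s.contains a0 then (model.lookup a0).getD false
        else acc && s.all (pvRule A B C) := by
  intro s
  induction s with
  | nil => intro acc; simp [pvLoopA]
  | cons Ri rest ih =>
    intro acc
    by_cases h0 : Ri = a0
    · subst h0; simp [pvLoopA]
    · have hc : (Ri :: rest).contains a0 = rest.contains a0 := by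
        simp [Ne.symm h0, String.ext_iff] at *
      rw [show pvLoopA model a0 A B C (Ri :: rest) acc =
            pvLoopA model a0 A B C rest (acc && pvRule A B C Ri) from ?_, ih, hc]
      · split_ifs <;> simp [List.all_cons, Bool.and_assoc]
      · simp only [pvLoopA, if_neg h0, pvRule]
        split_ifs <;> simp [Bool.and_true]

-- ===== VERDICT (by name: the statement is the Claim_ definition above) =====
theorem PL_True_P4_1_spec : Claim_equal_PL_True_P4_1 := by
  intro sentence model alpha _ _
  unfold Spec_PL_True_P4_1 PL_True_P4_1 PL_True_P4_1_alt
  rw [pvLoopA_eq]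
  rcases sentence with _ | ⟨x, xs⟩
  · simp
  · by_cases hc : (x :: xs).contains (alpha.headD "") = true
    · simp only [List.isEmpty_cons, Bool.not_false, Bool.true_and, hc, if_true]
    · rw [Bool.not_eq_true] at hc
      simp only [List.isEmpty_cons, Bool.not_false, Bool.true_and, hc, Bool.false_eq_true,
        if_false, Bool.true_and]
      rw [testBit_as_shift, List.foldl_cons, pvFoldMask_testBit]
      simp [pvFailMask_testBit, List.all_eq_not_any_not]
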